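-- pv_equiv track=rewrite | github.com/Githubtiger123/Leetcode_Python | L2110.py | getDescentPeriods1
-- ===== SOURCE A (Python) =====
-- from typing import List
--
-- def getDescentPeriods1(prices: List[int]) -> int:
--     n = len(prices)
--     con = [0] * n
--     con[n - 1] = 0
--
--     dp = [0] * n
--     dp[n - 1] = 1
--     for i in range(n - 2, -1, -1):
--         if prices[i] - 1 == prices[i + 1]:
--             con[i] = con[i + 1] + 1
--
--         if prices[i] - 1 == prices[i + 1]:
--             dp[i] = dp[i + 1] + 1 + con[i]
--         else:
--             dp[i] = dp[i + 1] + 1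
--     return dp[0]
-- ===== SOURCE B (Python) =====
-- from typing import List
--
-- def getDescentPeriods1(prices: List[int]) -> int:
--     prev = prices[0]
--     run = 1
--     total = 0
--     for x in prices[1:]:
--         if prev - 1 == x:
--             run += 1
--         else:
--             total += run * (run + 1) // 2
--             run = 1
--         prev = x
--     return total + run * (run + 1) // 2
-- ===== Notes on version B (the rewrite author's own statement) =====
-- stated objective: simpler
-- what changed: Replaced A's backward con/dp array recurrence with a single forward scan that tracks the current maximal descending-run length and adds the closed form run*(run+1)//2 per run.
import Mathlib
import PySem

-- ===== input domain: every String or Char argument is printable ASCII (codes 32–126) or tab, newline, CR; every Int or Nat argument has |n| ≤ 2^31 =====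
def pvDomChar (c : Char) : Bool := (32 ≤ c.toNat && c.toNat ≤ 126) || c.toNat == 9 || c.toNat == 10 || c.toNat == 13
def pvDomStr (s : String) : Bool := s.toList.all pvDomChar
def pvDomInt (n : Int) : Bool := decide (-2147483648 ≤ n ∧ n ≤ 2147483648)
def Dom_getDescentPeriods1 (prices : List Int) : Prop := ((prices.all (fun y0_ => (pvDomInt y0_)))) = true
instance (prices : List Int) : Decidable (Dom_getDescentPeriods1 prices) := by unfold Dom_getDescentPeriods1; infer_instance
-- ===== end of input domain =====

-- B replaces A's backward con/dp array recurrence by one forward scan with the closed form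
-- run*(run+1)//2 per maximal descending run (objective: simpler, O(1) extra space).

-- ===== PORT A =====
-- A's backward loop 'for i in range(n-2,-1,-1)' computes con[i],dp[i] from con[i+1],dp[i+1];
-- ported as the obvious structural recursion from the right carrying the pair (con[i], dp[i]).
def aFold : List Int → Int × Int
  | [] => (0, 0)            -- unreachable under Pre_ (n = 0 raises IndexError in Python)
  | [_] => (0, 1)           -- con[n-1] = 0, dp[n-1] = 1
  | p :: q :: rest =>
      let cd := aFold (q :: rest)
      let c := if p - 1 = q then cd.1 + 1 else 0
      (c, if p - 1 = q then cd.2 + 1 + c else cd.2 + 1)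

def getDescentPeriods1 (prices : List Int) : Int := (aFold prices).2

-- ===== PORT B =====
def bLoop (prev run total : Int) : List Int → Int
  | [] => total + PySem.Int.floordiv (run * (run + 1)) 2
  | x :: xs =>
      if prev - 1 = x then bLoop x (run + 1) total xs
      else bLoop x 1 (total + PySem.Int.floordiv (run * (run + 1)) 2) xs

def getDescentPeriods1_alt (prices : List Int) : Int :=
  match prices with
  | [] => 0                 -- unreachable under Pre_ (prices[0] raises IndexError in Python)
  | p :: rest => bLoop p 1 0 rest

-- ===== PRECONDITION & SPEC =====
-- Pre_ excludes only the empty list, on which both A (con[-1] on []) and B (prices[0]) raise IndexError.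
def Pre_getDescentPeriods1 (prices : List Int) : Prop := prices ≠ []
instance (prices : List Int) : Decidable (Pre_getDescentPeriods1 prices) := by unfold Pre_getDescentPeriods1; infer_instance
def pvWitness_getDescentPeriods1 : List Int := [3, 2, 1, 4]

def Spec_getDescentPeriods1 (prices : List Int) (out : Int) : Prop := out = getDescentPeriods1_alt prices
instance (prices : List Int) (out : Int) : Decidable (Spec_getDescentPeriods1 prices out) := by unfold Spec_getDescentPeriods1; infer_instance

-- ===== CLAIM (what is proved, stated in full; the proofs are below) =====
def Claim_equal_getDescentPeriods1 : Prop := ∀ (prices : List Int), Dom_getDescentPeriods1 prices → Pre_getDescentPeriods1 prices → Spec_getDescentPeriods1 prices (getDescentPeriods1 prices)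

-- ===== LEMMAS AND PROOFS =====

-- T r = r*(r+1)//2, the triangular-number term B adds per run
def pvT (r : Int) : Int := PySem.Int.floordiv (r * (r + 1)) 2

theorem pvT_succ (r : Int) : pvT (r + 1) = pvT r + (r + 1) := by
  unfold pvT
  rw [PySem.Int.floordiv_eq_ediv_of_pos (by norm_num), PySem.Int.floordiv_eq_ediv_of_pos (by norm_num)]
  have h : (r + 1) * (r + 1 + 1) = r * (r + 1) + (r + 1) * 2 := by ring
  rw [h, Int.add_mul_ediv_right _ _ (by norm_num)]

theorem pvT_one : pvT 1 = 1 := by decide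

theorem bLoop_nil (prev run total : Int) : bLoop prev run total [] = total + pvT run := rfl

theorem bLoop_cons (prev run total x : Int) (xs : List Int) :
    bLoop prev run total (x :: xs) =
      if prev - 1 = x then bLoop x (run + 1) total xs
      else bLoop x 1 (total + pvT run) xs := rfl

-- One invariant tying B's forward loop to A's backward recurrence:
-- the current run merges with the suffix's leading descent iff prev - 1 = head.
theorem bLoop_eq (xs : List Int) : ∀ (prev run total : Int),
    bLoop prev run total xs =
      total + pvT run + (aFold xs).2 +
        (match xs with
         | [] => 0
         | x :: _ => if prev - 1 = x then run * ((aFold xs).1 + 1) else 0) := by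
  induction xs with
  | nil => intro prev run total; simp [bLoop_nil, aFold]
  | cons x xs ih =>
    intro prev run total
    rw [bLoop_cons]
    by_cases h : prev - 1 = x
    · rw [if_pos h, ih]
      cases xs with
      | nil => simp [aFold, h, pvT_succ]; ring
      | cons y ys =>
        by_cases h2 : x - 1 = y
        · simp [aFold, h2, h, pvT_succ]; ring
        · simp [aFold, h2, h, pvT_succ]; ring
    · rw [if_neg h, ih]
      cases xs with
      | nil => simp [aFold, h, pvT_one]
      | cons y ys =>
        by_cases h2 : x - 1 = y
        · simp [aFold, h2, h, pvT_one]; ring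
        · simp [aFold, h2, h, pvT_one]; ring

-- ===== VERDICT (by name: the statement is the Claim_ definition above) =====
theorem getDescentPeriods1_spec : Claim_equal_getDescentPeriods1 := by
  intro prices _ hpre
  unfold Spec_getDescentPeriods1
  cases prices with
  | nil => exact absurd rfl hpre
  | cons p rest =>
    show (aFold (p :: rest)).2 = bLoop p 1 0 rest
    rw [bLoop_eq]
    cases rest with
    | nil => simp [aFold, pvT_one]
    | cons y ys =>
      by_cases h : p - 1 = y
      · simp [aFold, h, pvT_one]; ring
      · simp [aFold, h, pvT_one]; ring
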